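-- pv_equiv track=rewrite | github.com/Typhus148/Twitter-Lupus-tracker | developmentBuilds/twitter_api_states.py | thresh_hold_calculator
-- ===== SOURCE A (Python) =====
-- def thresh_hold_calculator(maxTweets):
--     x = int(maxTweets / 7)
--     threshhold = [0] * 8
--     i = 1
--     z = 0
--     y = 0
--     while i <= 8:
--         if i is 1:
--             threshhold[z] = 0
--             i += 1
--             z += 1
--         else:
--             threshhold[z] = threshhold[y] + x
--             i += 1
--             z += 1
--             y += 1
--     return threshhold
-- ===== SOURCE B (Python) =====
-- def thresh_hold_calculator(maxTweets):
--     x = int(maxTweets / 7)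
--     return [x * i for i in range(8)]
-- ===== Notes on version B (the rewrite author's own statement) =====
-- stated objective: simpler
-- what changed: Replaces the stateful while-loop with three index counters and a running additive accumulator by a closed-form per-index formula x*i over range(8).
import Mathlib
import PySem

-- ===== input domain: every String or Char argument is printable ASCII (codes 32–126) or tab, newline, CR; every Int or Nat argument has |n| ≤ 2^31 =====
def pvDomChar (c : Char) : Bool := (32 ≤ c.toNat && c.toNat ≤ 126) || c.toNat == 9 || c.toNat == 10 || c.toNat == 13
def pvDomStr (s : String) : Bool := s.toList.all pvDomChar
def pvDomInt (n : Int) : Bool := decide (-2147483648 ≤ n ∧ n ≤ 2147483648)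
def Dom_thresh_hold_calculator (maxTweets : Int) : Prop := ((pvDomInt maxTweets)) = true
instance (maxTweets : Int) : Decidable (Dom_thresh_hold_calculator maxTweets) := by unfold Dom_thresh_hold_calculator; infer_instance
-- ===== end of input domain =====

-- B replaces A's stateful while-loop (counters i,z,y + running additive accumulator) with the closed-form list [x*i for i in range(8)]; objective: simpler.

-- ===== PORT A =====
-- int(maxTweets / 7): truncating division toward zero = Int.tdiv; exact for |maxTweets| ≤ 2^31
-- (the true-division float result is never within 2^-20 of a wrong integer there).
def threshLoop (x : Int) (i z y : Nat) (threshhold : List Int) : List Int :=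
  if i ≤ 8 then
    if i = 1 then
      threshLoop x (i+1) (z+1) y (threshhold.set z 0)
    else
      threshLoop x (i+1) (z+1) (y+1) (threshhold.set z ((threshhold.getD y 0) + x))
  else threshhold
termination_by 9 - i

def thresh_hold_calculator (maxTweets : Int) : List Int :=
  let x := Int.tdiv maxTweets 7
  threshLoop x 1 0 0 [0, 0, 0, 0, 0, 0, 0, 0]

-- ===== PORT B =====
def thresh_hold_calculator_alt (maxTweets : Int) : List Int :=
  let x := Int.tdiv maxTweets 7
  (List.range 8).map (fun i => x * (i : Int))

-- ===== PRECONDITION & SPEC =====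
def Spec_thresh_hold_calculator (maxTweets : Int) (out : List Int) : Prop := out = thresh_hold_calculator_alt maxTweets
instance (maxTweets : Int) (out : List Int) : Decidable (Spec_thresh_hold_calculator maxTweets out) := by unfold Spec_thresh_hold_calculator; infer_instance

-- ===== CLAIM (what is proved, stated in full; the proofs are below) =====
def Claim_equal_thresh_hold_calculator : Prop := ∀ (maxTweets : Int), Dom_thresh_hold_calculator maxTweets → Spec_thresh_hold_calculator maxTweets (thresh_hold_calculator maxTweets)

-- ===== LEMMAS AND PROOFS =====

-- ===== VERDICT (by name: the statement is the Claim_ definition above) =====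
theorem thresh_hold_calculator_spec : Claim_equal_thresh_hold_calculator := by
  intro maxTweets _
  unfold Spec_thresh_hold_calculator thresh_hold_calculator thresh_hold_calculator_alt
  simp [threshLoop, List.range_succ]
  omega
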